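-- pv_equiv track=rewrite | github.com/vypxl/aoc | 2019/Day22.py | modpow_poly
-- ===== SOURCE A (Python) =====
-- def modpow_poly(m, b, l, count):
--     if count == 0:
--         return 1, 0
--     elif count % 2 == 0:
--         return modpow_poly(m * m % l, (m * b + b) % l, l, count // 2)
--     else:
--         c, d = modpow_poly(m, b, l, count - 1)
--         return m * c % l, (m * d + b) % l
-- ===== SOURCE B (Python) =====
-- def modpow_poly(m, b, l, count):
--     M, B = 1, 0
--     bm, bb = m, b
--     while count:
--         if count & 1:
--             M, B = M * bm % l, (M * bb + B) % l
--         bm, bb = bm * bm % l, (bm * bb + bb) % l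
--         count >>= 1
--     return M, B
-- ===== Notes on version B (the rewrite author's own statement) =====
-- stated objective: idiomatic
-- what changed: Replaced A's recursive halve/decrement exponentiation by an iterative binary-exponentiation loop that keeps an accumulator affine map (M,B) and a base map, composing on set bits and squaring the base each step.
import Mathlib
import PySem

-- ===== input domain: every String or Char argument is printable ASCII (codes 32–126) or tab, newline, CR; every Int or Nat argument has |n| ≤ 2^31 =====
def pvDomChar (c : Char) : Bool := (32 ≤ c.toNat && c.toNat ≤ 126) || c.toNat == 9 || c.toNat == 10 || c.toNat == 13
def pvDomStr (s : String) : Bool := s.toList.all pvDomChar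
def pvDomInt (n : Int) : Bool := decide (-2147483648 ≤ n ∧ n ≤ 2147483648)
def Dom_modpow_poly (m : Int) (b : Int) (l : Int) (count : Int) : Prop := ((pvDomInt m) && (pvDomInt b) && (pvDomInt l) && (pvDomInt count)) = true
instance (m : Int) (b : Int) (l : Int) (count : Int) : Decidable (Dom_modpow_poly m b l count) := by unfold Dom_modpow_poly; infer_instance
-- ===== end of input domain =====

-- B replaces A's recursion by an iterative binary-exponentiation loop over affine maps (idiomatic); equivalence claimed for count ≥ 0 and l ≠ 0 (A raises otherwise).

-- ===== PORT A =====
-- A recurses on count; for count < 0 Python diverges (RecursionError), which Pre_ excludes,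
-- so the port recurses on count.toNat (a totality guard only: for count ≥ 0, Python's
-- count % 2, count // 2, count - 1 coincide with the Nat operations n % 2, n / 2, n - 1).
def modpowPolyA (m : Int) (b : Int) (l : Int) (n : Nat) : Int × Int :=
  if n = 0 then (1, 0)
  else if n % 2 = 0 then
    modpowPolyA (PySem.Int.mod (m * m) l) (PySem.Int.mod (m * b + b) l) l (n / 2)
  else
    let cd := modpowPolyA m b l (n - 1)
    (PySem.Int.mod (m * cd.1) l, PySem.Int.mod (m * cd.2 + b) l)
  termination_by n
  decreasing_by all_goals omega

def modpow_poly (m : Int) (b : Int) (l : Int) (count : Int) : Int × Int :=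
  modpowPolyA m b l count.toNat

-- ===== PORT B =====
-- Source B's while-loop as a recursion on the (nonnegative) counter; same totality guard via toNat.
def modpowLoopB (l : Int) (R : Int × Int) (base : Int × Int) (n : Nat) : Int × Int :=
  if n = 0 then R
  else
    modpowLoopB l
      (if n % 2 = 1 then (PySem.Int.mod (R.1 * base.1) l, PySem.Int.mod (R.1 * base.2 + R.2) l) else R)
      (PySem.Int.mod (base.1 * base.1) l, PySem.Int.mod (base.1 * base.2 + base.2) l)
      (n / 2)
  termination_by n
  decreasing_by omega

def modpow_poly_alt (m : Int) (b : Int) (l : Int) (count : Int) : Int × Int :=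
  modpowLoopB l (1, 0) (m, b) count.toNat

-- ===== PRECONDITION & SPEC =====
-- Pre_ excludes exactly the inputs where Python A raises: count < 0 (unbounded recursion,
-- RecursionError) and l = 0 with count > 0 (ZeroDivisionError); B raises/diverges there too.
def Pre_modpow_poly (m : Int) (b : Int) (l : Int) (count : Int) : Prop :=
  0 ≤ count ∧ (count = 0 ∨ l ≠ 0)
instance (m : Int) (b : Int) (l : Int) (count : Int) : Decidable (Pre_modpow_poly m b l count) := by unfold Pre_modpow_poly; infer_instance

def pvWitness_modpow_poly : Int × Int × Int × Int := (7, 3, 10, 6)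

def Spec_modpow_poly (m : Int) (b : Int) (l : Int) (count : Int) (out : Int × Int) : Prop := out = modpow_poly_alt m b l count
instance (m : Int) (b : Int) (l : Int) (count : Int) (out : Int × Int) : Decidable (Spec_modpow_poly m b l count out) := by unfold Spec_modpow_poly; infer_instance

-- ===== CLAIM (what is proved, stated in full; the proofs are below) =====
def Claim_equal_modpow_poly : Prop := ∀ (m : Int) (b : Int) (l : Int) (count : Int), Dom_modpow_poly m b l count → Pre_modpow_poly m b l count → Spec_modpow_poly m b l count (modpow_poly m b l count)

-- ===== LEMMAS AND PROOFS =====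

theorem pv_dvd_sub_mod (a l : Int) : l ∣ a - PySem.Int.mod a l := by
  refine ⟨PySem.Int.floordiv a l, ?_⟩
  have h := PySem.Int.floordiv_mul_add_mod a l
  linarith

-- Python's mod is a congruence: equal residues mod l give equal pymod (l ≠ 0).
theorem pymod_congr {l : Int} (hl : l ≠ 0) {a a' : Int} (h : l ∣ a - a') :
    PySem.Int.mod a l = PySem.Int.mod a' l := by
  have h0 := pv_dvd_sub_mod a l
  have h1 := pv_dvd_sub_mod a' l
  have hd : l ∣ PySem.Int.mod a l - PySem.Int.mod a' l := by
    have h2 : l ∣ (a - a') - (a - PySem.Int.mod a l) + (a' - PySem.Int.mod a' l) :=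
      dvd_add (dvd_sub h h0) h1
    have he : (a - a') - (a - PySem.Int.mod a l) + (a' - PySem.Int.mod a' l) =
        PySem.Int.mod a l - PySem.Int.mod a' l := by ring
    rwa [he] at h2
  rcases lt_or_gt_of_ne hl with hneg | hpos
  · have b0 := PySem.Int.mod_neg_bounds a hneg
    have b1 := PySem.Int.mod_neg_bounds a' hneg
    have habs : |PySem.Int.mod a l - PySem.Int.mod a' l| < |l| := by
      rw [abs_lt]
      have : |l| = -l := abs_of_neg hneg
      rw [this]; omega
    have := Int.eq_zero_of_abs_lt_dvd ((abs_dvd l _).mpr hd) (by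
      have : |l| ∣ PySem.Int.mod a l - PySem.Int.mod a' l := (abs_dvd l _).mpr hd
      exact lt_of_lt_of_le habs (le_refl _))
    omega
  · have b0l := PySem.Int.mod_nonneg a hpos
    have b0u := PySem.Int.mod_lt a hpos
    have b1l := PySem.Int.mod_nonneg a' hpos
    have b1u := PySem.Int.mod_lt a' hpos
    have habs : |PySem.Int.mod a l - PySem.Int.mod a' l| < |l| := by
      rw [abs_lt]
      have : |l| = l := abs_of_pos hpos
      rw [this]; omega
    have := Int.eq_zero_of_abs_lt_dvd ((abs_dvd l _).mpr hd) (by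
      have h' : |l| = |l| := rfl
      exact lt_of_lt_of_le habs (le_refl _))
    omega

theorem pymod_mul_left {l : Int} (hl : l ≠ 0) (a c : Int) :
    PySem.Int.mod (PySem.Int.mod a l * c) l = PySem.Int.mod (a * c) l := by
  apply pymod_congr hl
  obtain ⟨k, hk⟩ := pv_dvd_sub_mod a l
  exact ⟨-k * c, by linear_combination (-c) * hk⟩

theorem pymod_mul_right {l : Int} (hl : l ≠ 0) (a c : Int) :
    PySem.Int.mod (a * PySem.Int.mod c l) l = PySem.Int.mod (a * c) l := by
  apply pymod_congr hl
  obtain ⟨k, hk⟩ := pv_dvd_sub_mod c l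
  exact ⟨-a * k, by linear_combination (-a) * hk⟩

theorem pymod_mul_add_left {l : Int} (hl : l ≠ 0) (a c d : Int) :
    PySem.Int.mod (PySem.Int.mod a l * c + d) l = PySem.Int.mod (a * c + d) l := by
  apply pymod_congr hl
  obtain ⟨k, hk⟩ := pv_dvd_sub_mod a l
  exact ⟨-k * c, by linear_combination (-c) * hk⟩

theorem pymod_mul_add_right {l : Int} (hl : l ≠ 0) (a c d : Int) :
    PySem.Int.mod (a * PySem.Int.mod c l + d) l = PySem.Int.mod (a * c + d) l := by
  apply pymod_congr hl
  obtain ⟨k, hk⟩ := pv_dvd_sub_mod c l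
  exact ⟨-a * k, by linear_combination (-a) * hk⟩

theorem pymod_add_right {l : Int} (hl : l ≠ 0) (a d : Int) :
    PySem.Int.mod (a + PySem.Int.mod d l) l = PySem.Int.mod (a + d) l := by
  apply pymod_congr hl
  obtain ⟨k, hk⟩ := pv_dvd_sub_mod d l
  exact ⟨-k, by linear_combination (-1 : Int) * hk⟩

theorem pymod_idem {l : Int} (hl : l ≠ 0) (a : Int) :
    PySem.Int.mod (PySem.Int.mod a l) l = PySem.Int.mod a l :=
  pymod_congr hl (by simpa [neg_sub] using dvd_neg.mpr (pv_dvd_sub_mod a l))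

-- A's result for n > 0 is componentwise a pymod, hence fixed by a further pymod.
theorem modpowPolyA_reduced {l : Int} :
    ∀ n, 0 < n → ∀ m b : Int, ∃ x y, modpowPolyA m b l n = (PySem.Int.mod x l, PySem.Int.mod y l) := by
  intro n
  induction n using Nat.strong_induction_on with
  | _ n ih =>
    intro hn m b
    rw [modpowPolyA]
    have hne : ¬ n = 0 := by omega
    simp only [hne, if_false]
    by_cases he : n % 2 = 0
    · simp only [he, if_true]
      exact ih (n / 2) (by omega) (by omega) _ _
    · simp only [he, if_false]
      exact ⟨_, _, rfl⟩

-- composition of affine maps, reduced mod l (exactly the update B's loop does on an odd bit)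
def compMod (l : Int) (R Q : Int × Int) : Int × Int :=
  (PySem.Int.mod (R.1 * Q.1) l, PySem.Int.mod (R.1 * Q.2 + R.2) l)

theorem loopB_eq {l : Int} (hl : l ≠ 0) :
    ∀ n, 0 < n → ∀ R base : Int × Int,
      modpowLoopB l R base n = compMod l R (modpowPolyA base.1 base.2 l n) := by
  intro n
  induction n using Nat.strong_induction_on with
  | _ n ih =>
    intro hn R base
    rw [modpowLoopB]
    have hne : ¬ n = 0 := by omega
    simp only [hne, if_false]
    by_cases he : n % 2 = 0
    · -- even, n ≥ 2: bit clear, just square the base; matches A's even rule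
      have h1 : ¬ n % 2 = 1 := by omega
      simp only [h1, if_false]
      rw [ih (n / 2) (by omega) (by omega)]
      conv_rhs => rw [modpowPolyA]
      simp only [hne, if_false, he, if_true]
    · have h1 : n % 2 = 1 := by omega
      simp only [h1, if_true]
      by_cases hone : n = 1
      · -- n = 1: loop ends; A's odd step on the identity
        subst hone
        rw [modpowLoopB, modpowLoopB]
        simp [modpowPolyA, compMod, pymod_mul_right hl, pymod_mul_add_right hl]
      · -- odd n ≥ 3: associativity of reduced composition
        rw [ih (n / 2) (by omega) (by omega)]
        have hA : modpowPolyA base.1 base.2 l n =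
            compMod l base (modpowPolyA (PySem.Int.mod (base.1 * base.1) l)
              (PySem.Int.mod (base.1 * base.2 + base.2) l) l (n / 2)) := by
          conv_lhs => rw [modpowPolyA]
          simp only [hne, if_false, he, if_false]
          have hpred : modpowPolyA base.1 base.2 l (n - 1) =
              modpowPolyA (PySem.Int.mod (base.1 * base.1) l)
                (PySem.Int.mod (base.1 * base.2 + base.2) l) l ((n - 1) / 2) := by
            rw [modpowPolyA]
            have : ¬ (n - 1) = 0 := by omega
            simp only [this, if_false]
            have : (n - 1) % 2 = 0 := by omega
            simp only [this, if_true]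
          have hdiv : (n - 1) / 2 = n / 2 := by omega
          rw [hpred, hdiv]
          rfl
        rw [hA]
        -- compMod l (compMod l R base) Q = compMod l R (compMod l base Q)
        set Q := modpowPolyA (PySem.Int.mod (base.1 * base.1) l)
          (PySem.Int.mod (base.1 * base.2 + base.2) l) l (n / 2) with hQ
        unfold compMod
        refine Prod.ext ?_ ?_
        · simp only
          rw [pymod_mul_left hl, pymod_mul_right hl, mul_assoc]
        · simp only
          rw [pymod_add_right hl, pymod_mul_add_left hl, pymod_mul_add_right hl]
          congr 1
          ring

-- ===== VERDICT (by name: the statement is the Claim_ definition above) =====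
theorem modpow_poly_spec : Claim_equal_modpow_poly := by
  intro m b l count _ hpre
  obtain ⟨hc, hl⟩ := hpre
  unfold Spec_modpow_poly modpow_poly modpow_poly_alt
  by_cases h0 : count = 0
  · subst h0
    rw [modpowPolyA, modpowLoopB]
    simp
  · have hl' : l ≠ 0 := hl.resolve_left h0
    have hn : 0 < count.toNat := by omega
    rw [loopB_eq hl' count.toNat hn (1, 0) (m, b)]
    obtain ⟨x, y, hxy⟩ := modpowPolyA_reduced (l := l) count.toNat hn m b
    show modpowPolyA m b l count.toNat = compMod l (1, 0) (modpowPolyA m b l count.toNat)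
    rw [hxy]
    unfold compMod
    simp only [one_mul, add_zero]
    rw [pymod_idem hl', pymod_idem hl']
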